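-- pv_equiv track=rewrite | github.com/dustin-ward/social-media-web-app | reddit2/password.py | salt_password
-- ===== SOURCE A (Python) =====
-- def salt_password(password):
--     i = 0
--     pass_arr = []
--     for char in password:
--         i += 1
--         pass_arr.append(char)
--         if i % 2 == 0:
--             pass_arr.append('$$%$')
--     return ''.join(pass_arr)
-- ===== SOURCE B (Python) =====
-- def salt_password(password):
--     parts = []
--     i = 0
--     while i < len(password):
--         chunk = password[i:i+2]
--         parts.append(chunk)
--         if len(chunk) == 2:
--             parts.append('$$%$')
--         i += 2
--     return ''.join(parts)
-- ===== Notes on version B (the rewrite author's own statement) =====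
-- stated objective: alternative
-- what changed: Replaces A's per-character loop with a parity counter by an index loop that steps two characters at a time, slicing each 2-char chunk and appending the salt after every full chunk.
import Mathlib
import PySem

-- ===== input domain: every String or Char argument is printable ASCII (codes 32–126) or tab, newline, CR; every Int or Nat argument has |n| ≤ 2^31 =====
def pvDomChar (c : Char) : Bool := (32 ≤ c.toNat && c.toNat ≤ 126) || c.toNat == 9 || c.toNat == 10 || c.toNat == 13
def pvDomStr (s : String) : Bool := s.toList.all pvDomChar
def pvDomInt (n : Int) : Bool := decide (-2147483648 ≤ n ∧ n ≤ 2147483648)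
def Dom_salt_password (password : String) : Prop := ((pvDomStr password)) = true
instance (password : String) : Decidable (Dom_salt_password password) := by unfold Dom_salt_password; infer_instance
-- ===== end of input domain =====

-- ===== PORT A =====
-- B replaces A's per-char loop (parity counter) by an index loop stepping two chars at a time: a different decomposition.
-- loop body of A's for-loop: state (i, pass_arr), one char per step
def saltStepA (st : Int × List (List Char)) (char : Char) : Int × List (List Char) :=
  let i := st.1 + 1
  let arr := st.2 ++ [[char]]
  if i % 2 == 0 then (i, arr ++ ["$$%$".toList]) else (i, arr)

def salt_password (password : String) : String :=
  -- ''.join(pass_arr) = concatenation of the accumulated pieces (exact)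
  String.ofList ((password.toList.foldl saltStepA (0, [])).2.flatten)

-- ===== PORT B =====
-- B's while loop: i only ever holds 0,2,4,…, so Nat is exact for it;
-- password[i:i+2] with 0 ≤ i is (l.drop i).take 2 (PySem.List.slice_natCast_add).
def saltLoopB (l : List Char) (i : Nat) (parts : List (List Char)) : List (List Char) :=
  if i < l.length then
    let chunk := (l.drop i).take 2
    let parts := parts ++ [chunk]
    let parts := if chunk.length == 2 then parts ++ ["$$%$".toList] else parts
    saltLoopB l (i + 2) parts
  else parts
termination_by l.length - i
decreasing_by omega

def salt_password_alt (password : String) : String :=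
  String.ofList ((saltLoopB password.toList 0 []).flatten)

-- ===== PRECONDITION & SPEC =====
def Spec_salt_password (password : String) (out : String) : Prop := out = salt_password_alt password
instance (password : String) (out : String) : Decidable (Spec_salt_password password out) := by unfold Spec_salt_password; infer_instance

-- ===== CLAIM (what is proved, stated in full; the proofs are below) =====
def Claim_equal_salt_password : Prop := ∀ (password : String), Dom_salt_password password → Spec_salt_password password (salt_password password)

-- ===== LEMMAS AND PROOFS =====
-- common characterisation: salt after every complete pair
def saltPairs : List Char → List Char
  | [] => []
  | [c] => [c]
  | a :: b :: rest => a :: b :: ("$$%$".toList ++ saltPairs rest)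

theorem saltA_aux : ∀ (l : List Char), ∀ (i : Int) (arr : List (List Char)), i % 2 = 0 →
    (l.foldl saltStepA (i, arr)).2.flatten = arr.flatten ++ saltPairs l := by
  intro l
  induction l using saltPairs.induct with
  | case1 =>
    intro i arr hi
    simp [saltPairs]
  | case2 a =>
    intro i arr hi
    have h1 : (i + 1) % 2 ≠ 0 := by omega
    simp [saltPairs, saltStepA, h1]
  | case3 a b rest ih =>
    intro i arr hi
    have h1 : (i + 1) % 2 ≠ 0 := by omega
    have h2 : (i + 1 + 1) % 2 = 0 := by omega
    simp only [List.foldl, saltStepA, h2, beq_iff_eq, h1, if_false, if_pos]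
    rw [ih (i + 1 + 1) _ h2]
    simp [saltPairs]

theorem saltB_aux : ∀ (l : List Char) (i : Nat) (parts : List (List Char)),
    (saltLoopB l i parts).flatten = parts.flatten ++ saltPairs (l.drop i) := by
  intro l i parts
  induction i, parts using saltLoopB.induct l with
  | case1 i parts hlt chunk parts1 parts2 ih =>
    rw [saltLoopB]
    simp only [hlt, if_pos]
    simp only [chunk, parts1, parts2, dite_eq_ite] at ih
    rw [ih]
    have hdrop : l.drop (i + 2) = (l.drop i).drop 2 := by
      rw [List.drop_drop]
    rw [hdrop]
    have hlen : 0 < (l.drop i).length := by simp; omega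
    match hld : l.drop i with
    | [] => rw [hld] at hlen; simp at hlen
    | [a] => simp [saltPairs]
    | a :: b :: rest => simp [saltPairs]
  | case2 i parts hnlt =>
    rw [saltLoopB]
    simp only [hnlt, if_false]
    have : l.drop i = [] := List.drop_eq_nil_of_le (by omega)
    simp [this, saltPairs]

-- ===== VERDICT (by name: the statement is the Claim_ definition above) =====
theorem salt_password_spec : Claim_equal_salt_password := by
  intro password _
  unfold Spec_salt_password salt_password salt_password_alt
  rw [saltA_aux password.toList 0 [] (by decide), saltB_aux password.toList 0 []]
  simp
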